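-- pv_equiv track=rewrite | github.com/JimmySunDance/advent-of-code-24 | day1.py | similarity_multi
-- ===== SOURCE A (Python) =====
-- def similarity_multi(list_a, list_b):
--     total = []
--
--     for i in list_a:
--         j = 0
--         for k in list_b:
--             if i == k:
--                 j+=1
--
--         total.append(i*j)
--     return sum(total)
-- ===== SOURCE B (Python) =====
-- def _run_len(xs, v):
--     # length of the leading run of elements equal to v
--     n = 0
--     while n < len(xs) and xs[n] == v:
--         n += 1
--     return n
--
--
-- def similarity_multi(list_a, list_b):
--     # Sorted two-pointer merge: walk matched runs of equal values in both
--     # sorted lists; each run of value v contributes v * (run in a) * (run in b).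
--     sa = sorted(list_a)
--     sb = sorted(list_b)
--     total = 0
--     while sa:
--         v = sa[0]
--         na = _run_len(sa, v)
--         k = 0
--         while k < len(sb) and sb[k] < v:
--             k += 1
--         sb = sb[k:]
--         nb = _run_len(sb, v)
--         total += v * na * nb
--         sa = sa[na:]
--         sb = sb[nb:]
--     return total
-- ===== Notes on version B (the rewrite author's own statement) =====
-- stated objective: faster
-- what changed: B sorts copies of both lists and does a two-pointer merge over equal-value runs, adding v * (run length in a) * (run length in b) per value, instead of A's inner scan of list_b for every element of list_a.
import Mathlib
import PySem

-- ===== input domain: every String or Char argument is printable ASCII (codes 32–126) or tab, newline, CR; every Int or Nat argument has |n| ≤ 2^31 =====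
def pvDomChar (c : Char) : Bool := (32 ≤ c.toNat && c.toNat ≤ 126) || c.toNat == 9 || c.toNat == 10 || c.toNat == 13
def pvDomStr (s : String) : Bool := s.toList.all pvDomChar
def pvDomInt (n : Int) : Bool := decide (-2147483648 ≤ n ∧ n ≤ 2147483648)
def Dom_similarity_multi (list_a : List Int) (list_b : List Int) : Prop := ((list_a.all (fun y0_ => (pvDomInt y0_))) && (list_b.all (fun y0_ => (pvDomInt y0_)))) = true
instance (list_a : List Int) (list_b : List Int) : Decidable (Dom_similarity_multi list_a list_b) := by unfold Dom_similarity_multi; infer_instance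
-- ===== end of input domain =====

-- B replaces A's quadratic nested scan by sorting both lists and merging equal-value runs with two pointers.

-- ===== PORT A =====
-- for i in list_a: j = 0; for k in list_b: if i == k: j += 1; total.append(i*j); return sum(total)
def similarity_multi (list_a : List Int) (list_b : List Int) : Int :=
  (list_a.foldl
    (fun total i =>
      total ++ [i * (list_b.foldl (fun j k => if i == k then j + 1 else j) 0)])
    []).sum

-- ===== PORT B =====
-- _run_len(xs, v): n = 0; while n < len(xs) and xs[n] == v: n += 1; return n
def runLen (xs : List Int) (v : Int) : Nat :=
  match xs with
  | [] => 0
  | x :: t => if x == v then runLen t v + 1 else 0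

-- k = 0; while k < len(sb) and sb[k] < v: k += 1   (number of leading elements < v)
def dropLtCount (xs : List Int) (v : Int) : Nat :=
  match xs with
  | [] => 0
  | x :: t => if x < v then dropLtCount t v + 1 else 0

-- the main 'while sa:' loop of B; sa/sb shrink by slicing, total accumulates
def mergeLoop (sa sb : List Int) (total : Int) : Int :=
  match sa with
  | [] => total
  | v :: rest =>
    let na := runLen (v :: rest) v
    let sb1 := sb.drop (dropLtCount sb v)
    let nb := runLen sb1 v
    mergeLoop ((v :: rest).drop na) (sb1.drop nb) (total + v * (na : Int) * (nb : Int))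
termination_by sa.length
decreasing_by
  simp only [runLen, beq_self_eq_true, if_true, List.drop_succ_cons, List.length_drop,
    List.length_cons]
  omega

-- sa = sorted(list_a); sb = sorted(list_b); total = 0; while sa: ...; return total
def similarity_multi_alt (list_a : List Int) (list_b : List Int) : Int :=
  mergeLoop (PySem.List.sorted list_a (fun x => x) false)
            (PySem.List.sorted list_b (fun x => x) false) 0

-- ===== PRECONDITION & SPEC =====
def Spec_similarity_multi (list_a : List Int) (list_b : List Int) (out : Int) : Prop := out = similarity_multi_alt list_a list_b
instance (list_a : List Int) (list_b : List Int) (out : Int) : Decidable (Spec_similarity_multi list_a list_b out) := by unfold Spec_similarity_multi; infer_instance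

-- ===== CLAIM (what is proved, stated in full; the proofs are below) =====
def Claim_equal_similarity_multi : Prop := ∀ (list_a : List Int) (list_b : List Int), Dom_similarity_multi list_a list_b → Spec_similarity_multi list_a list_b (similarity_multi list_a list_b)

-- ===== LEMMAS AND PROOFS =====

-- the leading run captured by runLen is all copies of v
theorem take_runLen_eq_replicate (xs : List Int) (v : Int) :
    xs.take (runLen xs v) = List.replicate (runLen xs v) v := by
  induction xs with
  | nil => simp [runLen]
  | cons x t ih =>
    by_cases h : x = v
    · subst h; simp [runLen, List.replicate_succ, ih]
    · simp [runLen, h]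

-- on a sorted list whose elements are all ≥ v, the leading run of v is all of its occurrences
theorem runLen_eq_count (xs : List Int) (v : Int)
    (hs : xs.Pairwise (· ≤ ·)) (hge : ∀ x ∈ xs, v ≤ x) :
    runLen xs v = xs.count v := by
  induction xs with
  | nil => simp [runLen]
  | cons x t ih =>
    rcases List.pairwise_cons.mp hs with ⟨hx, ht⟩
    by_cases h : x = v
    · subst h
      have : ∀ y ∈ t, x ≤ y := hx
      simp [runLen, List.count_cons_self, ih ht this]
    · have hvx : v < x := lt_of_le_of_ne (hge x (List.mem_cons_self)) (fun e => h e.symm)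
      have hnot : v ∉ t := fun hm => absurd (hx v hm) (by omega)
      simp [runLen, h, List.count_eq_zero.mpr hnot]

-- after dropping the leading run of v, everything is strictly above v
theorem drop_runLen_gt (xs : List Int) (v : Int)
    (hs : xs.Pairwise (· ≤ ·)) (hge : ∀ x ∈ xs, v ≤ x) :
    ∀ y ∈ xs.drop (runLen xs v), v < y := by
  induction xs with
  | nil => simp [runLen]
  | cons x t ih =>
    rcases List.pairwise_cons.mp hs with ⟨hx, ht⟩
    by_cases h : x = v
    · subst h
      simpa [runLen] using ih ht hx
    · have hvx : v < x := lt_of_le_of_ne (hge x (List.mem_cons_self)) (fun e => h e.symm)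
      intro y hy
      simp only [runLen, h, beq_iff_eq, if_false, List.drop_zero] at hy
      rcases List.mem_cons.mp hy with rfl | hy
      · exact hvx
      · exact lt_of_lt_of_le hvx (hx y hy)

-- dropping a run of v's preserves the count of any i ≠ v
theorem count_drop_runLen (xs : List Int) (v i : Int) (hne : i ≠ v) :
    (xs.drop (runLen xs v)).count i = xs.count i := by
  conv_rhs => rw [← List.take_append_drop (runLen xs v) xs]
  rw [List.count_append, take_runLen_eq_replicate, List.count_replicate]
  simp [Ne.symm hne]

-- everything surviving dropLtCount is ≥ v (on a sorted list)
theorem drop_dropLtCount_ge (xs : List Int) (v : Int) (hs : xs.Pairwise (· ≤ ·)) :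
    ∀ y ∈ xs.drop (dropLtCount xs v), v ≤ y := by
  induction xs with
  | nil => simp [dropLtCount]
  | cons x t ih =>
    rcases List.pairwise_cons.mp hs with ⟨hx, ht⟩
    by_cases h : x < v
    · simpa [dropLtCount, h] using ih ht
    · intro y hy
      simp only [dropLtCount, h, if_false, List.drop_zero] at hy
      rcases List.mem_cons.mp hy with rfl | hy
      · omega
      · exact le_trans (by omega) (hx y hy)

-- dropping only elements < v preserves the count of any i ≥ v
theorem count_drop_dropLtCount (xs : List Int) (v i : Int) (hvi : v ≤ i) :
    (xs.drop (dropLtCount xs v)).count i = xs.count i := by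
  induction xs with
  | nil => simp
  | cons x t ih =>
    by_cases h : x < v
    · have : x ≠ i := by omega
      simp [dropLtCount, h, this, ih]
    · simp [dropLtCount, h]

theorem pairwise_drop {xs : List Int} (n : Nat) (hs : xs.Pairwise (· ≤ ·)) :
    (xs.drop n).Pairwise (· ≤ ·) :=
  hs.sublist (List.drop_sublist n xs)

-- loop invariant: on sorted inputs, mergeLoop adds Σ_{i ∈ sa} i * count(i, sb)
theorem mergeLoop_eq (n : Nat) :
    ∀ (sa sb : List Int) (total : Int), sa.length ≤ n →
    sa.Pairwise (· ≤ ·) → sb.Pairwise (· ≤ ·) →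
    mergeLoop sa sb total = total + ((sa.map (fun i => i * (sb.count i : Int))).sum) := by
  induction n with
  | zero =>
    intro sa sb total hlen _ _
    have : sa = [] := List.length_eq_zero_iff.mp (Nat.le_zero.mp hlen)
    subst this; simp [mergeLoop]
  | succ n ih =>
    intro sa sb total hlen hsa hsb
    match sa with
    | [] => simp [mergeLoop]
    | v :: rest =>
      rcases List.pairwise_cons.mp hsa with ⟨hvrest, hrest⟩
      have hge_a : ∀ x ∈ v :: rest, v ≤ x := by
        intro x hx
        rcases List.mem_cons.mp hx with rfl | hx
        · exact le_refl _
        · exact hvrest x hx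
      rw [mergeLoop]
      set sb1 := sb.drop (dropLtCount sb v) with hsb1
      have hsb1p : sb1.Pairwise (· ≤ ·) := pairwise_drop _ hsb
      have hsb1ge : ∀ y ∈ sb1, v ≤ y := drop_dropLtCount_ge sb v hsb
      set na := runLen (v :: rest) v with hna
      set nb := runLen sb1 v with hnb
      -- counts
      have hna_c : na = (v :: rest).count v := runLen_eq_count _ v hsa hge_a
      have hnb_c : (nb : Int) = (sb.count v : Int) := by
        rw [hnb, runLen_eq_count sb1 v hsb1p hsb1ge, hsb1,
          count_drop_dropLtCount sb v v (le_refl v)]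
      -- shapes of the residual lists
      set sa' := (v :: rest).drop na with hsa'
      set sb2 := sb1.drop nb with hsb2
      have hsa'p : sa'.Pairwise (· ≤ ·) := pairwise_drop _ hsa
      have hsa'gt : ∀ y ∈ sa', v < y := drop_runLen_gt _ v hsa hge_a
      have hna1 : 1 ≤ na := by rw [hna]; simp [runLen]
      have hlen' : sa'.length ≤ n := by
        rw [hsa', List.length_drop]
        simp only [List.length_cons] at hlen ⊢
        omega
      rw [ih sa' sb2 _ hlen' hsa'p (pairwise_drop _ hsb1p)]
      -- counts in sb2 agree with counts in sb for every element of sa'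
      have hmap : sa'.map (fun i => i * (sb2.count i : Int))
          = sa'.map (fun i => i * (sb.count i : Int)) := by
        apply List.map_congr_left
        intro i hi
        have hgt := hsa'gt i hi
        have h1 : sb2.count i = sb1.count i :=
          count_drop_runLen sb1 v i (by omega)
        have h2 : sb1.count i = sb.count i :=
          count_drop_dropLtCount sb v i (by omega)
        rw [h1, h2]
      rw [hmap]
      -- split the sum over sa = replicate na v ++ sa'
      have hsplit : (v :: rest) = List.replicate na v ++ sa' := by
        rw [hsa', ← take_runLen_eq_replicate (v :: rest) v, ← hna,
          List.take_append_drop]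
      rw [hsplit, List.map_append, List.sum_append, List.map_replicate,
        List.sum_replicate]
      have hval : na • (v * (sb.count v : Int)) = v * (na : Int) * (nb : Int) := by
        rw [nsmul_eq_mul, hnb_c]; ring
      rw [hval]; ring

-- A computes Σ_{i ∈ list_a} i * count(i, list_b)
theorem similarity_multi_eq_sum (la lb : List Int) :
    similarity_multi la lb = (la.map (fun i => i * (lb.count i : Int))).sum := by
  unfold similarity_multi
  rw [PySem.List.foldl_append_singleton_eq_map]
  simp only [List.nil_append]
  congr 1
  apply List.map_congr_left
  intro i _
  have hA : lb.foldl (fun j k => if i == k then j + 1 else j) 0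
      = (0 : Int) + (lb.countP (fun k => i == k) : Int) :=
    PySem.List.foldl_count_if (fun k => i == k) lb 0
  rw [hA]
  have hc : lb.countP (fun k => i == k) = lb.count i := by
    unfold List.count
    exact List.countP_congr (fun a _ => by simp only [beq_iff_eq]; omega)
  rw [hc]; ring

-- the two programs agree everywhere
theorem similarity_multi_eq (la lb : List Int) :
    similarity_multi la lb = similarity_multi_alt la lb := by
  unfold similarity_multi_alt
  set sa := PySem.List.sorted la (fun x => x) false with hsa
  set sb := PySem.List.sorted lb (fun x => x) false with hsb
  have hpa : sa.Pairwise (· ≤ ·) := by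
    simpa using PySem.List.sorted_pairwise la (fun x => x)
  have hpb : sb.Pairwise (· ≤ ·) := by
    simpa using PySem.List.sorted_pairwise lb (fun x => x)
  rw [mergeLoop_eq sa.length sa sb 0 (le_refl _) hpa hpb, zero_add]
  have hperm_a : sa.Perm la := PySem.List.sorted_perm la (fun x => x) false
  have hperm_b : sb.Perm lb := PySem.List.sorted_perm lb (fun x => x) false
  have hcount : ∀ i : Int, sb.count i = lb.count i := fun i => hperm_b.count_eq i
  have : sa.map (fun i => i * (sb.count i : Int))
      = sa.map (fun i => i * (lb.count i : Int)) := by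
    apply List.map_congr_left; intro i _; rw [hcount]
  rw [this, similarity_multi_eq_sum]
  exact ((hperm_a.map (fun i => i * (lb.count i : Int))).sum_eq).symm

-- ===== VERDICT (by name: the statement is the Claim_ definition above) =====
theorem similarity_multi_spec : Claim_equal_similarity_multi := by
  intro la lb _
  exact similarity_multi_eq la lb
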